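-- pv_equiv track=rewrite | github.com/luizaugustoliveira/Algoritmos | Testes_Scripts/unicos.py | conta1
-- ===== SOURCE A (Python) =====
-- def conta1(lista, elemento):
--     contador = 0
--     for i in range(len(lista)):
--         if lista[i] == elemento:
--             contador += 1
--
--     if contador == 1:
--         return True
--     else:
--         return False
-- ===== SOURCE B (Python) =====
-- def conta1(lista, elemento):
--     if elemento not in lista:
--         return False
--     first = lista.index(elemento)
--     return elemento not in lista[first + 1:]
-- ===== Notes on version B (the rewrite author's own statement) =====
-- stated objective: alternative
-- what changed: Replaces the full counting loop (count every occurrence, then compare to 1) with a find-first-then-verify decomposition: locate the first occurrence with index() and check the remainder slice contains no second one, short-circuiting via membership tests.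
import Mathlib
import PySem

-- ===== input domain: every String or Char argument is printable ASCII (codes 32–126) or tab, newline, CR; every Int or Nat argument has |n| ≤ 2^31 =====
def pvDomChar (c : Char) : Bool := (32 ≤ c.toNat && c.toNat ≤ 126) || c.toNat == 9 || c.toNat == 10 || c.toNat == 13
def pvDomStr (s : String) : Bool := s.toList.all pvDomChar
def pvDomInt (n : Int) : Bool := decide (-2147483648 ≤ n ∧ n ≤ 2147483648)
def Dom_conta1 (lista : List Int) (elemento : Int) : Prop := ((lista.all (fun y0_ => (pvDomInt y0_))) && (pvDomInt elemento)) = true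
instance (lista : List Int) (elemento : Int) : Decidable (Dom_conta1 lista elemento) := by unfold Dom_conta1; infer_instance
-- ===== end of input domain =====

-- B replaces A's full counting loop by a find-first-then-verify-no-second decomposition; proved equal on all inputs.


-- ===== PORT A =====
-- contador = 0; for i in range(len(lista)): if lista[i] == elemento: contador += 1; return contador == 1
def conta1 (lista : List Int) (elemento : Int) : Bool :=
  let contador : Int :=
    (PySem.List.pyRange 0 (lista.length : Int) 1).foldl
      (fun acc i => if PySem.List.pyGetD lista i 0 == elemento then acc + 1 else acc) 0
  if contador = 1 then true else false

-- ===== PORT B =====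
-- if elemento not in lista: return False; first = lista.index(elemento); return elemento not in lista[first+1:]
def conta1_alt (lista : List Int) (elemento : Int) : Bool :=
  if lista.contains elemento then
    match PySem.List.index? lista elemento with
    | some first => !((PySem.List.slice lista (some ((first : Int) + 1)) none).contains elemento)
    | none => false   -- unreachable: membership was just checked
  else false

-- ===== PRECONDITION & SPEC =====
def Spec_conta1 (lista : List Int) (elemento : Int) (out : Bool) : Prop := out = conta1_alt lista elemento
instance (lista : List Int) (elemento : Int) (out : Bool) : Decidable (Spec_conta1 lista elemento out) := by unfold Spec_conta1; infer_instance

-- ===== CLAIM (what is proved, stated in full; the proofs are below) =====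
def Claim_equal_conta1 : Prop := ∀ (lista : List Int) (elemento : Int), Dom_conta1 lista elemento → Spec_conta1 lista elemento (conta1 lista elemento)

-- ===== LEMMAS AND PROOFS =====

-- A counts: its result is 'count = 1'.
theorem conta1_eq_count (lista : List Int) (elemento : Int) :
    conta1 lista elemento = decide (lista.count elemento = 1) := by
  unfold conta1
  rw [PySem.List.foldl_pyRange_zero_pyGetD' lista 0
      (fun acc x => if x == elemento then acc + 1 else acc) 0]
  rw [PySem.List.foldl_beq_add_one]
  simp only [Int.zero_add]
  by_cases h : lista.count elemento = 1 <;> simp [h]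

-- B also decides 'count = 1', by induction following B's own recursion on the list.
theorem conta1_alt_eq_count (lista : List Int) (elemento : Int) :
    conta1_alt lista elemento = decide (lista.count elemento = 1) := by
  induction lista with
  | nil => simp [conta1_alt]
  | cons x xs ih =>
    unfold conta1_alt
    by_cases hx : x = elemento
    · subst hx
      rw [PySem.List.index?_cons_self]
      simp only [List.contains_cons, BEq.rfl, Bool.true_or, if_true]
      rw [show ((0 : Nat) : Int) + 1 = ((1 : Nat) : Int) by norm_num,
          PySem.List.slice_from_natCast]
      simp [List.count_cons_self, List.count_eq_zero]
    · rw [PySem.List.index?_cons_of_ne xs hx]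
      simp only [List.contains_cons]
      rw [show (elemento == x) = false by simpa using Ne.symm hx,
          List.count_cons_of_ne hx]
      simp only [Bool.false_or]
      by_cases hmem : xs.contains elemento
      · rw [if_pos hmem]
        rcases Option.isSome_iff_exists.mp
          ((PySem.List.index?_isSome_iff xs elemento).mpr (by simpa using hmem)) with ⟨k, hk⟩
        rw [hk]
        simp only [Option.map_some]
        rw [show ((k + 1 : Nat) : Int) + 1 = (((k + 2 : Nat)) : Int) by push_cast; ring,
            PySem.List.slice_from_natCast]
        rw [← ih]
        unfold conta1_alt
        rw [if_pos hmem, hk]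
        simp only
        rw [show ((k : Nat) : Int) + 1 = (((k + 1 : Nat)) : Int) by push_cast; ring,
            PySem.List.slice_from_natCast]
        rfl
      · rw [if_neg (by simpa using hmem)]
        have : xs.count elemento = 0 := List.count_eq_zero.mpr (by simpa using hmem)
        simp [this]

-- ===== VERDICT (by name: the statement is the Claim_ definition above) =====
theorem conta1_spec : Claim_equal_conta1 := by
  intro lista elemento _
  unfold Spec_conta1
  rw [conta1_eq_count, conta1_alt_eq_count]
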